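-- pv_equiv track=rewrite | github.com/LGKAI/ProgrammingForAI | Session5_Array2D-Tuple-Set-Dictionary/Array2D-Tuple-Set-Dictionary.py | find_max_votes
-- ===== SOURCE A (Python) =====
-- def find_max_votes(candidates):
--     vote_count = {}
--     for candidate in candidates:
--         if candidate in vote_count:
--             vote_count[candidate] += 1
--         else:
--             vote_count[candidate] = 1
--     max_votes = max(vote_count.values())
--     max_candidates = [candidate for candidate, votes in vote_count.items() if votes == max_votes]
--     return min(max_candidates)
-- ===== SOURCE B (Python) =====
-- def find_max_votes(candidates):
--     vote_count = {}
--     for candidate in candidates: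
--         vote_count[candidate] = vote_count.get(candidate, 0) + 1
--     it = iter(vote_count.items())
--     try:
--         best_cand, best_votes = next(it)
--     except StopIteration:
--         raise ValueError("find_max_votes() arg is an empty sequence")
--     for cand, votes in it:
--         if votes > best_votes or (votes == best_votes and cand < best_cand):
--             best_cand, best_votes = cand, votes
--     return best_cand
-- ===== Notes on version B (the rewrite author's own statement) =====
-- stated objective: alternative
-- what changed: replaced A's three-pass selection (max over values, filter for the maximum, min over the filtered candidates) by a single fold over the vote-count items keeping the running (best candidate, best votes) pair
import Mathlib
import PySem

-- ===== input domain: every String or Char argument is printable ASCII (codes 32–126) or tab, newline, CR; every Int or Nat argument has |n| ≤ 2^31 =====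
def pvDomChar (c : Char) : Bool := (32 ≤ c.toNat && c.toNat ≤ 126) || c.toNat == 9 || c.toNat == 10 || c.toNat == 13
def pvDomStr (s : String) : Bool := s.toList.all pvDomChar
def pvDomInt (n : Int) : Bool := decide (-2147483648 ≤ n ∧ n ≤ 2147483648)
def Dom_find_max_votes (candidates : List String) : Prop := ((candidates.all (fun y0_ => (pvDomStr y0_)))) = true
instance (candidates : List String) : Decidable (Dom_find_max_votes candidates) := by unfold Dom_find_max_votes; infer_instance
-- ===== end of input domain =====

-- B replaces A's three-pass selection (max of values, filter for the maximum, min of those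
-- candidates) by one fold over the vote-count items keeping the running best (candidate, votes) pair.

-- ===== PORT A =====
def find_max_votes (candidates : List String) : String :=
  let vote_count : PySem.Dict String Int := candidates.foldl (fun d c =>
    if d.contains c then d.insert c (d.getD c 0 + 1) else d.insert c 1) PySem.Dict.empty
  match PySem.List.max? vote_count.values (fun v => v) with
  | none => ""   -- unreachable: max([]) raises ValueError; Pre_ excludes the empty list
  | some max_votes =>
      let max_candidates := (vote_count.items.filter (fun p => p.2 == max_votes)).map (fun p => p.1)
      (PySem.List.min? max_candidates (fun c => c)).getD ""  -- min? is some here: max_candidates is nonempty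

-- ===== PORT B =====
-- the loop body of Source B: update (best_cand, best_votes) with (cand, votes)
def pvStep (b p : String × Int) : String × Int :=
  if p.2 > b.2 ∨ (p.2 = b.2 ∧ p.1 < b.1) then p else b

def find_max_votes_alt (candidates : List String) : String :=
  let vote_count : PySem.Dict String Int := candidates.foldl (fun d c =>
    d.insert c (d.getD c 0 + 1)) PySem.Dict.empty
  match vote_count.items with
  | [] => ""   -- unreachable: Source B raises ValueError here; Pre_ excludes the empty list
  | p0 :: rest => (rest.foldl pvStep p0).1

-- ===== PRECONDITION & SPEC =====
-- Pre_ excludes only the empty list, on which A raises ValueError (max of an empty sequence).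
def Pre_find_max_votes (candidates : List String) : Prop := candidates ≠ []
instance (candidates : List String) : Decidable (Pre_find_max_votes candidates) := by
  unfold Pre_find_max_votes; infer_instance
def pvWitness_find_max_votes : List String := (["a", "b", "a"])
def Spec_find_max_votes (candidates : List String) (out : String) : Prop := out = find_max_votes_alt candidates
instance (candidates : List String) (out : String) : Decidable (Spec_find_max_votes candidates out) := by unfold Spec_find_max_votes; infer_instance

-- ===== CLAIM (what is proved, stated in full; the proofs are below) =====
def Claim_equal_find_max_votes : Prop := ∀ (candidates : List String), Dom_find_max_votes candidates → Pre_find_max_votes candidates → Spec_find_max_votes candidates (find_max_votes candidates)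

-- ===== LEMMAS AND PROOFS =====

theorem pvStep_snd (b p : String × Int) : (pvStep b p).2 = max b.2 p.2 := by
  unfold pvStep
  rcases max_cases b.2 p.2 with ⟨h1, h2⟩ | ⟨h1, h2⟩ <;> split_ifs with h <;> omega

-- the heart: the running-best fold computes both A's max and A's min-of-the-maximal-candidates
theorem pvFold_sel (t : List (String × Int)) (b : String × Int) :
    (t.foldl pvStep b).2 = (t.map (fun p => p.2)).foldl max b.2 ∧
    some (t.foldl pvStep b).1 =
      PySem.List.min? (((b :: t).filter (fun p => p.2 == (t.foldl pvStep b).2)).map (fun p => p.1))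
        (fun c => c) := by
  induction t generalizing b with
  | nil =>
      refine ⟨rfl, ?_⟩
      simp [PySem.List.min?_id_cons]
  | cons p t ih =>
      obtain ⟨ih1, ih2⟩ := ih (pvStep b p)
      have hsnd : (pvStep b p).2 = max b.2 p.2 := pvStep_snd b p
      constructor
      · simpa [hsnd] using ih1
      · have hle : max b.2 p.2 ≤ (List.foldl pvStep (pvStep b p) t).2 := by
          rw [ih1, ← hsnd]; exact (PySem.List.le_foldl_max _ _).1
        show some (List.foldl pvStep (pvStep b p) t).1 =
          PySem.List.min? (List.map (fun q => q.1)
            (List.filter (fun q => q.2 == (List.foldl pvStep (pvStep b p) t).2) (b :: p :: t)))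
            (fun c => c)
        generalize hR : List.foldl pvStep (pvStep b p) t = R at ih2 hle ⊢
        have hble : b.2 ≤ R.2 := le_trans (le_max_left _ _) hle
        have hple : p.2 ≤ R.2 := le_trans (le_max_right _ _) hle
        simp only [List.filter_cons, beq_iff_eq] at ih2 ⊢
        by_cases hb : b.2 = R.2 <;> by_cases hp : p.2 = R.2
        · -- both heads tie the maximum: both survive A's filter, min folds them in
          have hbp : p.2 = b.2 := by omega
          have hs : pvStep b p = if p.1 < b.1 then p else b := by
            unfold pvStep; simp [hbp]
          rw [hs] at ih2
          by_cases hc : p.1 < b.1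
          · rw [if_pos hc, if_pos hp] at ih2
            rw [if_pos hb, if_pos hp]
            simp only [List.map_cons] at ih2 ⊢
            rw [PySem.List.min?_id_cons] at ih2 ⊢
            rw [List.foldl_cons, min_eq_right (le_of_lt hc)]
            exact ih2
          · rw [if_neg hc, if_pos hb] at ih2
            rw [if_pos hb, if_pos hp]
            simp only [List.map_cons] at ih2 ⊢
            rw [PySem.List.min?_id_cons] at ih2 ⊢
            rw [List.foldl_cons, min_eq_left (le_of_not_gt hc)]
            exact ih2
        · -- only b ties the maximum: p is dropped by the filter and by the fold
          have hcond : ¬ (p.2 > b.2 ∨ (p.2 = b.2 ∧ p.1 < b.1)) := by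
            rintro (h | ⟨h, _⟩) <;> omega
          have hs : pvStep b p = b := by unfold pvStep; rw [if_neg hcond]
          rw [hs, if_pos hb] at ih2
          rw [if_pos hb, if_neg hp]
          exact ih2
        · -- only p ties the maximum: the fold switches to p, b is dropped by the filter
          have hgt : p.2 > b.2 := by omega
          have hs : pvStep b p = p := by unfold pvStep; rw [if_pos (Or.inl hgt)]
          rw [hs, if_pos hp] at ih2
          rw [if_neg hb, if_pos hp]
          exact ih2
        · -- neither head is maximal: both dropped
          have hs2 : ¬ ((pvStep b p).2 = R.2) := by
            rw [hsnd]
            rcases max_cases b.2 p.2 with ⟨h, _⟩ | ⟨h, _⟩ <;> rw [h] <;> assumption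
          rw [if_neg hs2] at ih2
          rw [if_neg hb, if_neg hp]
          exact ih2

-- the two counting loops build the same dict (A's contains-branch is B's getD with default 0)
theorem pvDict_eq (candidates : List String) :
    candidates.foldl (fun d c =>
        if d.contains c then d.insert c (d.getD c 0 + 1) else d.insert c 1)
      (PySem.Dict.empty : PySem.Dict String Int) =
    candidates.foldl (fun d c => d.insert c (d.getD c 0 + 1)) PySem.Dict.empty := by
  apply PySem.List.foldl_congr_mem
  intro d c _
  by_cases h : d.contains c = true
  · simp [h]
  · have h0 : d.getD c 0 = 0 := PySem.Dict.getD_of_not_contains d 0 (by simpa using h)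
    simp [h, h0]

theorem pvItems_ne_nil (candidates : List String) (h : candidates ≠ []) :
    (candidates.foldl (fun d c => d.insert c (d.getD c 0 + 1))
      (PySem.Dict.empty : PySem.Dict String Int)).items ≠ [] := by
  intro hnil
  have hkeys : (candidates.foldl (fun d c => d.insert c (d.getD c 0 + 1))
      (PySem.Dict.empty : PySem.Dict String Int)).keys = PySem.Set.ofList candidates := by
    rw [PySem.Dict.keys_foldl_insert (f := fun d c => d.getD c 0 + 1),
      PySem.Dict.keys_empty, PySem.Set.update_nil_left]
  obtain ⟨c, cs, hcc⟩ := List.exists_cons_of_ne_nil h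
  have hmem : c ∈ PySem.Set.ofList candidates :=
    (PySem.Set.mem_ofList _ _).2 (by rw [hcc]; exact List.mem_cons_self ..)
  rw [← hkeys] at hmem
  simp only [PySem.Dict.keys, hnil] at hmem
  simp at hmem

-- ===== VERDICT (by name: the statement is the Claim_ definition above) =====
theorem find_max_votes_spec : Claim_equal_find_max_votes := by
  intro candidates _ hpre
  unfold Spec_find_max_votes find_max_votes find_max_votes_alt
  rw [pvDict_eq]
  obtain ⟨p0, rest, hitems⟩ := List.exists_cons_of_ne_nil (pvItems_ne_nil candidates hpre)
  obtain ⟨h1, h2⟩ := pvFold_sel rest p0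
  have hvals : (candidates.foldl (fun d c => d.insert c (d.getD c 0 + 1))
      (PySem.Dict.empty : PySem.Dict String Int)).values = p0.2 :: rest.map (fun p => p.2) := by
    simp only [PySem.Dict.values, hitems, List.map_cons]
  simp only [hvals, hitems, PySem.List.max?_id_cons]
  rw [← h1, ← h2]
  rfl
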